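-- pv_equiv track=rewrite | github.com/KennethSidibe/RoomBookZoom | TextBot.py | isStringARoom
-- ===== SOURCE A (Python) =====
-- def isStringARoom(string):
--     # check if provided string is a reservable room by the system
--     # Like FTX-514
--
--     if len(string) > 10 or len(string) < 7:
--         return False
--
--     rooms = {
--             'CRX' : ['CRX-C520', 'CRX-C521', 'CRX-C522', 'CRX-C523', 'CRX-C524',
--                      'CRX-C525', 'CRX-C526', 'CRX-C527', 'CRX-C528','CRX-C529',
--                      'CRX-C541', 'CRX-C542', 'CRX-C543', 'CRX-C544', 'CRX-C545'],
--
--              'FTX' : ['FTX-514', 'FTX-515', 'FTX-525A', 'FTX-525B',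
--               'FTX-525C', 'FTX-525D', 'FTX-525G', 'FTX-525H', 'FTX-525J'],
--
--              'MRT' : ['MRT-404', 'MRT-405', 'MRT-406', 'MRT-407', 'MRT-408', 'MRT-409',
--                       'MRT-410', 'MRT-411', 'MRT-412','MRT-415', 'MRT-417', 'MRT-418'],
--
--              'RGN' : ['RGN-1020J', 'RGN-1020K', 'RGN-1020L',
--                       'RGN-1020M', 'RGN-1020N', 'RGN-1020P']
--              }
--
--     chars = []
--     Buildings = rooms.keys()
--
--     for i in range(0, 3):
--         chars.append(string[i])
--
--     charFromString = ''.join(chars)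
--
--     if not (charFromString in rooms):
--         return False
--
--     roomsForBuilding = rooms[charFromString]
--
--     if string in roomsForBuilding:
--         return True
--
--     else:
--         return False
-- ===== SOURCE B (Python) =====
-- # B: generate the bookable room IDs from compact numeric/letter patterns once,
-- # then answer each query with a single membership test (no per-call dict, no
-- # prefix extraction, no per-building scan).
--
-- def _buildRooms():
--     rooms = set()
--     for d in range(520, 530):
--         rooms.add("CRX-C%d" % d)
--     for d in range(541, 546):
--         rooms.add("CRX-C%d" % d)
--     rooms.add("FTX-514")
--     rooms.add("FTX-515")
--     for c in "ABCDGHJ":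
--         rooms.add("FTX-525" + c)
--     for n in list(range(404, 413)) + [415, 417, 418]:
--         rooms.add("MRT-%d" % n)
--     for c in "JKLMNP":
--         rooms.add("RGN-1020" + c)
--     return frozenset(rooms)
--
-- _ROOMS = _buildRooms()
--
-- def isStringARoom(string):
--     return len(string) >= 7 and len(string) <= 10 and string in _ROOMS
-- ===== Notes on version B (the rewrite author's own statement) =====
-- stated objective: alternative
-- what changed: Replaces the per-call dict construction, character-by-character prefix extraction, key check and per-building list scan with a room table generated once from compact numeric/letter patterns (ranges 520-529, 541-545, 404-412, letter suffixes) and a single conjunctive length-plus-membership test per call.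
import Mathlib
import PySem

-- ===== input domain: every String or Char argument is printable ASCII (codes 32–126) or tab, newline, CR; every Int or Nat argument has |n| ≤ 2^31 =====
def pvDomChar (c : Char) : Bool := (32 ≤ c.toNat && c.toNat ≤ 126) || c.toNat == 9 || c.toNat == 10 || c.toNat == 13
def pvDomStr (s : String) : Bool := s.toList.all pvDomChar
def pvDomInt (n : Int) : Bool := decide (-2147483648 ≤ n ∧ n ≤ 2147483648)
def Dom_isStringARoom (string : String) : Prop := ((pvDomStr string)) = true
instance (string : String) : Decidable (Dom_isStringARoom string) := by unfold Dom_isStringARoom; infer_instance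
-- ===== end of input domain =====

-- B differs from A: the room table is generated once from compact numeric/letter
-- patterns and each call is a single length-plus-membership test, instead of A's
-- per-call dict building, prefix extraction, key check and per-building list scan
-- (objective: alternative).

-- ===== PORT A =====
-- the per-call dict of A (built inside the function body; lifted as a plain constant literal)
def roomsA : PySem.Dict String (List String) := PySem.Dict.ofList
  [ ("CRX", ["CRX-C520", "CRX-C521", "CRX-C522", "CRX-C523", "CRX-C524",
             "CRX-C525", "CRX-C526", "CRX-C527", "CRX-C528", "CRX-C529",
             "CRX-C541", "CRX-C542", "CRX-C543", "CRX-C544", "CRX-C545"]),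
    ("FTX", ["FTX-514", "FTX-515", "FTX-525A", "FTX-525B",
             "FTX-525C", "FTX-525D", "FTX-525G", "FTX-525H", "FTX-525J"]),
    ("MRT", ["MRT-404", "MRT-405", "MRT-406", "MRT-407", "MRT-408", "MRT-409",
             "MRT-410", "MRT-411", "MRT-412", "MRT-415", "MRT-417", "MRT-418"]),
    ("RGN", ["RGN-1020J", "RGN-1020K", "RGN-1020L",
             "RGN-1020M", "RGN-1020N", "RGN-1020P"]) ]

def isStringARoom (string : String) : Bool :=
  if PySem.Str.len string > 10 || PySem.Str.len string < 7 then false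
  else
    -- for i in range(0, 3): chars.append(string[i]) ; indexing is in range since len ≥ 7,
    -- so the `.getD ' '` default of pyGet? is unreachable (Python would raise IndexError there)
    let chars : List Char :=
      (PySem.List.pyRange 0 3 1).foldl (fun acc i => acc ++ [(PySem.Str.pyGet? string i).getD ' ']) []
    let charFromString : String := String.ofList chars
    match PySem.Dict.get? roomsA charFromString with
    | none => false
    | some roomsForBuilding => if string ∈ roomsForBuilding then true else false

-- ===== PORT B =====
-- _buildRooms(): the room set generated from compact patterns, loop for loop
def allRoomsB : PySem.Set String :=
  let s := PySem.Set.empty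
  let s := (PySem.List.pyRange 520 530 1).foldl
    (fun s d => PySem.Set.add s (String.ofList ("CRX-C".toList ++ PySem.Int.toChars d))) s
  let s := (PySem.List.pyRange 541 546 1).foldl
    (fun s d => PySem.Set.add s (String.ofList ("CRX-C".toList ++ PySem.Int.toChars d))) s
  let s := PySem.Set.add s "FTX-514"
  let s := PySem.Set.add s "FTX-515"
  let s := "ABCDGHJ".toList.foldl
    (fun s c => PySem.Set.add s (String.ofList ("FTX-525".toList ++ [c]))) s
  let s := ((PySem.List.pyRange 404 413 1) ++ [415, 417, 418]).foldl
    (fun s n => PySem.Set.add s (String.ofList ("MRT-".toList ++ PySem.Int.toChars n))) s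
  let s := "JKLMNP".toList.foldl
    (fun s c => PySem.Set.add s (String.ofList ("RGN-1020".toList ++ [c]))) s
  s

def isStringARoom_alt (string : String) : Bool :=
  decide (PySem.Str.len string ≥ 7) && decide (PySem.Str.len string ≤ 10)
    && PySem.Set.contains allRoomsB string

-- ===== PRECONDITION & SPEC =====
def Spec_isStringARoom (string : String) (out : Bool) : Prop := out = isStringARoom_alt string
instance (string : String) (out : Bool) : Decidable (Spec_isStringARoom string out) := by unfold Spec_isStringARoom; infer_instance

-- ===== CLAIM (what is proved, stated in full; the proofs are below) =====
def Claim_equal_isStringARoom : Prop := ∀ (string : String), Dom_isStringARoom string → Spec_isStringARoom string (isStringARoom string)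

-- ===== LEMMAS AND PROOFS =====

-- B's generated table, evaluated to the flat list of the 42 room IDs
set_option maxRecDepth 10000 in
theorem allRoomsB_eq : allRoomsB =
    ["CRX-C520", "CRX-C521", "CRX-C522", "CRX-C523", "CRX-C524",
     "CRX-C525", "CRX-C526", "CRX-C527", "CRX-C528", "CRX-C529",
     "CRX-C541", "CRX-C542", "CRX-C543", "CRX-C544", "CRX-C545",
     "FTX-514", "FTX-515", "FTX-525A", "FTX-525B",
     "FTX-525C", "FTX-525D", "FTX-525G", "FTX-525H", "FTX-525J",
     "MRT-404", "MRT-405", "MRT-406", "MRT-407", "MRT-408", "MRT-409",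
     "MRT-410", "MRT-411", "MRT-412", "MRT-415", "MRT-417", "MRT-418",
     "RGN-1020J", "RGN-1020K", "RGN-1020L",
     "RGN-1020M", "RGN-1020N", "RGN-1020P"] := by decide

-- ===== VERDICT (by name: the statement is the Claim_ definition above) =====
set_option maxRecDepth 10000 in
theorem isStringARoom_spec : Claim_equal_isStringARoom := by
  intro s _
  unfold Spec_isStringARoom
  by_cases hm : s ∈ (allRoomsB : List String)
  · -- s is one of the 42 literal room IDs: evaluate both sides
    have hm2 : s ∈ (["CRX-C520", "CRX-C521", "CRX-C522", "CRX-C523", "CRX-C524",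
     "CRX-C525", "CRX-C526", "CRX-C527", "CRX-C528", "CRX-C529",
     "CRX-C541", "CRX-C542", "CRX-C543", "CRX-C544", "CRX-C545",
     "FTX-514", "FTX-515", "FTX-525A", "FTX-525B",
     "FTX-525C", "FTX-525D", "FTX-525G", "FTX-525H", "FTX-525J",
     "MRT-404", "MRT-405", "MRT-406", "MRT-407", "MRT-408", "MRT-409",
     "MRT-410", "MRT-411", "MRT-412", "MRT-415", "MRT-417", "MRT-418",
     "RGN-1020J", "RGN-1020K", "RGN-1020L",
     "RGN-1020M", "RGN-1020N", "RGN-1020P"] : List String) := by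
      rw [allRoomsB_eq] at hm; exact hm
    fin_cases hm2 <;> decide
  · -- s is not a room ID: both programs return false
    have hB : isStringARoom_alt s = false := by
      unfold isStringARoom_alt
      cases hc : PySem.Set.contains allRoomsB s
      · simp
      · simp only [PySem.Set.contains_iff] at hc
        exact absurd hc hm
    rw [hB]
    rw [allRoomsB_eq] at hm
    simp only [List.mem_cons, not_or] at hm
    unfold isStringARoom
    split
    · rfl
    · dsimp only
      split
      · rfl
      · next l heq =>
        have hl : l = ["CRX-C520", "CRX-C521", "CRX-C522", "CRX-C523", "CRX-C524",
             "CRX-C525", "CRX-C526", "CRX-C527", "CRX-C528", "CRX-C529",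
             "CRX-C541", "CRX-C542", "CRX-C543", "CRX-C544", "CRX-C545"] ∨
            l = ["FTX-514", "FTX-515", "FTX-525A", "FTX-525B",
             "FTX-525C", "FTX-525D", "FTX-525G", "FTX-525H", "FTX-525J"] ∨
            l = ["MRT-404", "MRT-405", "MRT-406", "MRT-407", "MRT-408", "MRT-409",
             "MRT-410", "MRT-411", "MRT-412", "MRT-415", "MRT-417", "MRT-418"] ∨
            l = ["RGN-1020J", "RGN-1020K", "RGN-1020L",
             "RGN-1020M", "RGN-1020N", "RGN-1020P"] := by
          simp only [PySem.Dict.get?] at heq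
          rw [show roomsA.items = [("CRX", ["CRX-C520", "CRX-C521", "CRX-C522", "CRX-C523", "CRX-C524",
             "CRX-C525", "CRX-C526", "CRX-C527", "CRX-C528", "CRX-C529",
             "CRX-C541", "CRX-C542", "CRX-C543", "CRX-C544", "CRX-C545"]),
            ("FTX", ["FTX-514", "FTX-515", "FTX-525A", "FTX-525B",
             "FTX-525C", "FTX-525D", "FTX-525G", "FTX-525H", "FTX-525J"]),
            ("MRT", ["MRT-404", "MRT-405", "MRT-406", "MRT-407", "MRT-408", "MRT-409",
             "MRT-410", "MRT-411", "MRT-412", "MRT-415", "MRT-417", "MRT-418"]),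
            ("RGN", ["RGN-1020J", "RGN-1020K", "RGN-1020L",
             "RGN-1020M", "RGN-1020N", "RGN-1020P"])] from rfl] at heq
          rw [Option.map_eq_some_iff] at heq
          obtain ⟨p, hp, rfl⟩ := heq
          have hpmem := List.mem_of_find?_eq_some hp
          fin_cases hpmem <;> simp
        obtain ⟨h1, h2, h3, h4, h5, h6, h7, h8, h9, h10, h11, h12, h13, h14, h15,
          h16, h17, h18, h19, h20, h21, h22, h23, h24, h25, h26, h27, h28, h29, h30,
          h31, h32, h33, h34, h35, h36, h37, h38, h39, h40, h41, h42, -⟩ := hm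
        rcases hl with h | h | h | h <;> subst h <;>
          simp [h1, h2, h3, h4, h5, h6, h7, h8, h9, h10, h11, h12, h13, h14, h15,
            h16, h17, h18, h19, h20, h21, h22, h23, h24, h25, h26, h27, h28, h29, h30,
            h31, h32, h33, h34, h35, h36, h37, h38, h39, h40, h41, h42]
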